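-- pv_equiv track=rewrite | github.com/DAHYUN-HAN/Algorithm_Study | practice_solution.py | solution
-- ===== SOURCE A (Python) =====
-- def solution(s):
--     time = 0
--     delete = 0
--     while(s != '1'):
--         time += 1
--         count = s.count('1')
--         delete += s.count('0')
--         s = str(bin(count)[2:])
--     answer = [time, delete]
--     return answer
-- ===== SOURCE B (Python) =====
-- def _chain(n):
--     # trajectory of ones-counts, down to (but excluding) 1
--     return [] if n == 1 else [n] + _chain(n.bit_count())
--
-- def solution(s):
--     if s == '1':
--         return [0, 0]
--     c = _chain(s.count('1'))
--     time = 1 + len(c)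
--     delete = s.count('0') + sum(n.bit_length() - n.bit_count() for n in c)
--     return [time, delete]
-- ===== Notes on version B (the rewrite author's own statement) =====
-- stated objective: alternative
-- what changed: B recursively materialises the trajectory of ones-counts as a list and then computes time and delete in separate aggregation passes (length and a sum of bit_length-bit_count), instead of A's single destructive while-loop that rebuilds and re-scans a binary string each step.
import Mathlib
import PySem

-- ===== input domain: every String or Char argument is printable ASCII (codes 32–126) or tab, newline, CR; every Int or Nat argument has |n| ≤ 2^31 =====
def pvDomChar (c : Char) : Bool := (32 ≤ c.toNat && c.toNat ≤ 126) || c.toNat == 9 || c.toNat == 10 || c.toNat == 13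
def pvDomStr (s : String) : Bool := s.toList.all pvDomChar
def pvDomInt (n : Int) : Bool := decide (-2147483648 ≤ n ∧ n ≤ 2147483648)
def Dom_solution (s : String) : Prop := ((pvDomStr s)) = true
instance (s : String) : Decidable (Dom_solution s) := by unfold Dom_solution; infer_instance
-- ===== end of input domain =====

-- B recursively materialises the trajectory of ones-counts as a list and aggregates
-- time/delete in separate passes, instead of A's destructive string-rebuilding loop
-- (objective: alternative).

-- ===== PORT A =====
-- port of A: the while-loop rebuilds the binary string of the ones-count each iteration.
-- 'bin(count)[2:]' is PySem.Int.toBinChars. The loop is written with a structural fuel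
-- argument only to make it total: the fuel-0 and count-0 branches are reached exactly
-- where Python loops forever, and those inputs are excluded by Pre_solution below.
def pvLoopA : Nat → List Char → Int → Int → List Int
  | 0, _, _, _ => []
  | fuel + 1, s, time, delete =>
    if s = ['1'] then [time, delete]
    else
      let count := PySem.Chars.count s ['1']
      if count = 0 then []
      else pvLoopA fuel (PySem.Int.toBinChars (count : Int)) (time + 1)
            (delete + (PySem.Chars.count s ['0'] : Int))

def solution (s : String) : List Int := pvLoopA (s.toList.length + 2) s.toList 0 0

-- ===== PORT B =====
-- port of B's _chain: the recursion is written with a fuel argument only to make it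
-- total; the fuel-0 branch is reached exactly where Python recurses forever (no '1'
-- ever appears), and those inputs are excluded by Pre_solution below.
def pvChain : Nat → Nat → List Nat
  | 0, _ => []
  | fuel + 1, n => if n = 1 then [] else n :: pvChain fuel (PySem.Int.bitCount (n : Int))

-- port of B: build the trajectory list, then aggregate time (its length) and delete
-- (a sum of bit_length - bit_count over it) in separate passes.
def solution_alt (s : String) : List Int :=
  if s = "1" then [0, 0]
  else
    let c := pvChain (PySem.Str.count s "1" + 1) (PySem.Str.count s "1")
    [1 + (c.length : Int),
     (PySem.Str.count s "0" : Int) +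
       (c.map (fun (n : Nat) => ((PySem.Int.bitLength n : Int) - (PySem.Int.bitCount n : Int)))).sum]

-- ===== PRECONDITION & SPEC =====
-- Pre_ excludes strings containing no '1' character: on those A (and B) loop forever.
def Pre_solution (s : String) : Prop := '1' ∈ s.toList
instance (s : String) : Decidable (Pre_solution s) := by unfold Pre_solution; infer_instance
def pvWitness_solution : String := "10"
def Spec_solution (s : String) (out : List Int) : Prop := out = solution_alt s
instance (s : String) (out : List Int) : Decidable (Spec_solution s out) := by unfold Spec_solution; infer_instance

-- ===== CLAIM (what is proved, stated in full; the proofs are below) =====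
def Claim_equal_solution : Prop := ∀ (s : String), Dom_solution s → Pre_solution s → Spec_solution s (solution s)

-- ===== LEMMAS AND PROOFS =====

-- Python str.count with a single-character needle is the character count.
theorem pvCountGo_single (c : Char) : ∀ (l : List Char) (fuel acc : Nat), l.length ≤ fuel →
    PySem.Chars.count.go [c] fuel l acc = acc + l.count c := by
  intro l
  induction l with
  | nil => intro fuel acc _; cases fuel <;> simp [PySem.Chars.count.go]
  | cons h t ih =>
    intro fuel acc hf
    cases fuel with
    | zero => simp at hf
    | succ f =>
      simp only [PySem.Chars.count.go]
      have hd : List.drop [c].length (h :: t) = t := rfl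
      by_cases hc : c == h
      · rw [if_pos (by simp [List.isPrefixOf, hc]), hd]
        rw [ih f (acc + 1) (by simpa using hf)]
        have hhc : (h == c) = true := by simpa [BEq.comm] using hc
        simp [List.count_cons, hhc]; omega
      · rw [if_neg (by simp [List.isPrefixOf, hc])]
        rw [ih f acc (by simpa using hf)]
        have hhc : (h == c) = false := by simpa [BEq.comm] using hc
        simp [List.count_cons, hhc]

theorem pvCount_single (l : List Char) (c : Char) :
    PySem.Chars.count l [c] = l.count c := by
  simp [PySem.Chars.count, pvCountGo_single c l l.length 0 le_rfl]

-- the digit list of bin(n)[2:], as a structural recursion on a fuel bound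
def pvBDigsF : Nat → Nat → List Char
  | 0, _ => []
  | fuel + 1, n => (if n < 2 then [] else pvBDigsF fuel (n / 2)) ++ [(n % 2).digitChar]

def pvBDigs (n : Nat) : List Char := pvBDigsF (n + 1) n

theorem pvBDigsF_irrel : ∀ (n f g : Nat), n < f → n < g → pvBDigsF f n = pvBDigsF g n := by
  intro n
  induction n using Nat.strong_induction_on with
  | _ n ih =>
    intro f g hf hg
    match f, g with
    | f' + 1, g' + 1 =>
      simp only [pvBDigsF]
      by_cases h : n < 2
      · simp [h]
      · rw [if_neg h, if_neg h, ih (n / 2) (by omega) f' g' (by omega) (by omega)]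

theorem pvBDigs_unfold (n : Nat) :
    pvBDigs n = (if n < 2 then [] else pvBDigs (n / 2)) ++ [(n % 2).digitChar] := by
  show pvBDigsF (n + 1) n = _
  simp only [pvBDigsF]
  by_cases h : n < 2
  · simp [h]
  · rw [if_neg h, if_neg h, pvBDigsF_irrel (n / 2) n (n / 2 + 1) (by omega) (by omega)]
    rfl

theorem pvToDigitsCore_eq : ∀ (fuel n : Nat) (acc : List Char), n < fuel →
    Nat.toDigitsCore 2 fuel n acc = pvBDigs n ++ acc := by
  intro fuel
  induction fuel with
  | zero => intro n acc h; omega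
  | succ f ih =>
    intro n acc h
    rw [pvBDigs_unfold]
    simp only [Nat.toDigitsCore]
    by_cases h2 : n / 2 = 0
    · rw [if_pos h2]
      have : n < 2 := by omega
      simp [this]
    · rw [if_neg h2]
      rw [ih (n / 2) _ (by omega)]
      have : ¬ n < 2 := by omega
      simp [this]

theorem pvToBinChars_eq (n : Nat) : PySem.Int.toBinChars (n : Int) = pvBDigs n := by
  simp only [PySem.Int.toBinChars]
  rw [if_neg (by omega)]
  simp only [Int.toNat_natCast, Nat.toDigits]
  simpa using pvToDigitsCore_eq (n + 1) n [] (by omega)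

theorem pvCount1_bdigs : ∀ n : Nat, (pvBDigs n).count '1' = PySem.Int.bitCount (n : Int) := by
  intro n
  induction n using Nat.strong_induction_on with
  | _ n ih =>
    rw [pvBDigs_unfold]
    by_cases h : n < 2
    · interval_cases n <;> decide
    · rw [if_neg h, PySem.Int.bitCount_natCast (show 0 < n by omega)]
      rw [List.count_append, ih (n / 2) (by omega)]
      have hs : List.count '1' [(n % 2).digitChar] = n % 2 := by
        rcases Nat.mod_two_eq_zero_or_one n with h2 | h2 <;> rw [h2] <;> decide
      rw [hs]
      omega

theorem pvCount0_bdigs : ∀ n : Nat, 1 ≤ n →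
    (pvBDigs n).count '0' + PySem.Int.bitCount (n : Int) = PySem.Int.bitLength (n : Int) := by
  intro n
  induction n using Nat.strong_induction_on with
  | _ n ih =>
    intro hn
    rw [pvBDigs_unfold]
    by_cases h : n < 2
    · interval_cases n; decide
    · rw [if_neg h, PySem.Int.bitCount_natCast (show 0 < n by omega),
        PySem.Int.bitLength_natCast (show 0 < n by omega)]
      rw [List.count_append]
      have hih := ih (n / 2) (by omega) (by omega)
      have hs : List.count '0' [(n % 2).digitChar] + n % 2 = 1 := by
        rcases Nat.mod_two_eq_zero_or_one n with h2 | h2 <;> rw [h2] <;> decide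
      omega

theorem pvLen_bdigs : ∀ n : Nat, 1 ≤ n → (pvBDigs n).length = PySem.Int.bitLength (n : Int) := by
  intro n
  induction n using Nat.strong_induction_on with
  | _ n ih =>
    intro hn
    rw [pvBDigs_unfold]
    by_cases h : n < 2
    · interval_cases n; decide
    · rw [if_neg h, PySem.Int.bitLength_natCast (show 0 < n by omega)]
      have hih := ih (n / 2) (by omega) (by omega)
      rw [List.length_append]
      simp only [List.length_cons, List.length_nil]
      omega

theorem pvBitLength_pos : ∀ n : Nat, 1 ≤ n → 1 ≤ PySem.Int.bitLength (n : Int) := by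
  intro n hn
  rw [PySem.Int.bitLength_natCast (show 0 < n by omega)]
  omega

theorem pvBitCount_pos : ∀ n : Nat, 1 ≤ n → 1 ≤ PySem.Int.bitCount (n : Int) := by
  intro n
  induction n using Nat.strong_induction_on with
  | _ n ih =>
    intro hn
    rw [PySem.Int.bitCount_natCast (show 0 < n by omega)]
    by_cases hp : n % 2 = 1
    · omega
    · have := ih (n / 2) (by omega) (by omega)
      omega

theorem pvBitCount_le : ∀ n : Nat, PySem.Int.bitCount (n : Int) ≤ n := by
  intro n
  induction n using Nat.strong_induction_on with
  | _ n ih =>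
    by_cases hn : n = 0
    · subst hn; simp
    · rw [PySem.Int.bitCount_natCast (show 0 < n by omega)]
      have := ih (n / 2) (by omega)
      omega

theorem pvBitCount_lt (n : Nat) (h : 2 ≤ n) : PySem.Int.bitCount (n : Int) < n := by
  rw [PySem.Int.bitCount_natCast (show 0 < n by omega)]
  have := pvBitCount_le (n / 2)
  omega

theorem pvBDigs_ne_one (n : Nat) (h1 : 1 ≤ n) (h2 : n ≠ 1) : pvBDigs n ≠ ['1'] := by
  intro he
  have hl : (pvBDigs n).length = 1 := by rw [he]; rfl
  rw [pvLen_bdigs n h1] at hl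
  rw [PySem.Int.bitLength_natCast (show 0 < n by omega)] at hl
  have := pvBitLength_pos (n / 2) (by omega)
  omega

-- A's loop from the state reached after the first pass equals B's chain aggregation
theorem pvLoopA_chain : ∀ c : Nat, 1 ≤ c → ∀ f₁ f₂ : Nat, c ≤ f₁ → c ≤ f₂ → ∀ t d : Int,
    pvLoopA f₁ (PySem.Int.toBinChars (c : Int)) t d =
      [t + ((pvChain f₂ c).length : Int),
       d + ((pvChain f₂ c).map
          (fun (n : Nat) => ((PySem.Int.bitLength n : Int) - (PySem.Int.bitCount n : Int)))).sum] := by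
  intro c
  induction c using Nat.strong_induction_on with
  | _ c ih =>
    intro hc f₁ f₂ hf₁ hf₂ t d
    obtain ⟨a, rfl⟩ : ∃ a, f₁ = a + 1 := ⟨f₁ - 1, by omega⟩
    obtain ⟨b, rfl⟩ : ∃ b, f₂ = b + 1 := ⟨f₂ - 1, by omega⟩
    by_cases h1 : c = 1
    · subst h1
      have hb : PySem.Int.toBinChars ((1 : Nat) : Int) = ['1'] := by decide
      rw [hb]
      simp [pvLoopA, pvChain]
    · simp only [pvLoopA, pvChain]
      rw [pvToBinChars_eq]
      rw [if_neg (pvBDigs_ne_one c hc h1), if_neg h1]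
      simp only [pvCount_single, pvCount1_bdigs]
      have hones : 1 ≤ PySem.Int.bitCount (c : Int) := pvBitCount_pos c hc
      have hlt : PySem.Int.bitCount (c : Int) < c := pvBitCount_lt c (by omega)
      rw [if_neg (show ¬ PySem.Int.bitCount (c : Int) = 0 by omega)]
      rw [ih _ hlt hones a b (by omega) (by omega) (t + 1)
            (d + ((pvBDigs c).count '0' : Int))]
      simp only [List.map_cons, List.sum_cons, List.length_cons, List.cons.injEq, and_true]
      have h0 : ((pvBDigs c).count '0' : Int) =
          (PySem.Int.bitLength (c : Int) : Int) - (PySem.Int.bitCount (c : Int) : Int) := by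
        have := pvCount0_bdigs c hc
        omega
      rw [h0]
      constructor
      · push_cast; ring
      · ring

-- ===== VERDICT (by name: the statement is the Claim_ definition above) =====
theorem solution_spec : Claim_equal_solution := by
  unfold Claim_equal_solution
  intro s _ hpre
  unfold Spec_solution solution solution_alt Pre_solution at *
  by_cases h : s.toList = ['1']
  · have hs : s = "1" := by
      have h2 := congrArg String.ofList h
      simpa using h2
    rw [if_pos hs]
    show pvLoopA (s.toList.length + 1 + 1) s.toList 0 0 = [0, 0]
    rw [pvLoopA, if_pos h]
  · have hs : s ≠ "1" := by
      intro he; apply h; rw [he]; rfl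
    rw [if_neg hs]
    show pvLoopA (s.toList.length + 1 + 1) s.toList 0 0 = _
    rw [pvLoopA, if_neg h]
    have hcount : 1 ≤ PySem.Chars.count s.toList ['1'] := by
      rw [pvCount_single]
      exact List.count_pos_iff.mpr hpre
    rw [if_neg (by omega)]
    have h1 : PySem.Str.count s "1" = PySem.Chars.count s.toList ['1'] := by
      rw [PySem.Str.count_eq]; rfl
    have h0 : PySem.Str.count s "0" = PySem.Chars.count s.toList ['0'] := by
      rw [PySem.Str.count_eq]; rfl
    simp only [h1, h0]
    have hle : PySem.Chars.count s.toList ['1'] ≤ s.toList.length := by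
      rw [pvCount_single]; exact List.count_le_length
    simp only [zero_add]
    rw [pvLoopA_chain (PySem.Chars.count s.toList ['1']) hcount (s.toList.length + 1)
          (PySem.Chars.count s.toList ['1'] + 1) (by omega) (by omega) 1
          ((PySem.Chars.count s.toList ['0'] : Int))]
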